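-- pv_equiv track=rewrite | github.com/duongdoandanghoc/CTDL_GT | bai2.py | generate_blum_numbers
-- ===== SOURCE A (Python) =====
-- def sieve_of_eratosthenes(limit):
--     primes = [True] * (limit + 1)
--     primes[0] = primes[1] = False
--     for i in range(2, int(limit ** 0.5) + 1):
--         if primes[i]:
--             for j in range(i * i, limit + 1, i):
--                 primes[j] = False
--     return [i for i, is_prime in enumerate(primes) if is_prime]
--
-- def generate_blum_numbers(N):
--     primes = sieve_of_eratosthenes(N)
--     blum_numbers = []
--     for p in primes:
--         if p % 4 == 3:
--             for q in primes:
--                 if q % 4 == 3 and p != q: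
--                     blum_number = p * q
--                     if blum_number < N:
--                         blum_numbers.append(blum_number)
--     return sorted(set(blum_numbers))
-- ===== SOURCE B (Python) =====
-- def sieve_of_eratosthenes(limit):
--     primes = [True] * (limit + 1)
--     primes[0] = primes[1] = False
--     for i in range(2, int(limit ** 0.5) + 1):
--         if primes[i]:
--             for j in range(i * i, limit + 1, i):
--                 primes[j] = False
--     return [i for i, is_prime in enumerate(primes) if is_prime]
--
-- def generate_blum_numbers(N):
--     # primes ≡ 3 (mod 4), in increasing order
--     L = [p for p in sieve_of_eratosthenes(N) if p % 4 == 3]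
--     out = []
--     for i, p in enumerate(L):
--         for q in L[i + 1:]:
--             if p * q >= N:
--                 break          # tail is increasing, no later q can work
--             out.append(p * q)
--     return sorted(set(out))
-- ===== Notes on version B (the rewrite author's own statement) =====
-- stated objective: faster
-- what changed: Instead of scanning all ordered pairs of primes and deduplicating, B keeps only the primes p%4==3, pairs each p only with larger primes from the sorted tail and breaks as soon as p*q >= N, so the inner scan is proportional to the output.
import Mathlib
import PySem

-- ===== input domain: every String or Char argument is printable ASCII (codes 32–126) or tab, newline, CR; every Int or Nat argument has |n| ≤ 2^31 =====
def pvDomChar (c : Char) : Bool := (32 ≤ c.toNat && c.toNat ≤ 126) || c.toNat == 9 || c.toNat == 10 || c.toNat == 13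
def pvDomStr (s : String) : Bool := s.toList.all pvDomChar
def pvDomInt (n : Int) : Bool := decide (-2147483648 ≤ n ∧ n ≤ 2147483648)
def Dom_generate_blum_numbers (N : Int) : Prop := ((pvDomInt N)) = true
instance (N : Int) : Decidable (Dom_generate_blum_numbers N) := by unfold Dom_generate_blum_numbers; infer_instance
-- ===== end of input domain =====

-- B replaces A's scan over all ordered prime pairs (then set-dedup) by pairing each prime p ≡ 3 (mod 4)
-- only with the larger such primes, stopping at the first q with p*q ≥ N (the kept list is increasing).

-- ===== PORT A =====
-- shared module helper (identical source text in Source A and Source B).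
-- int(limit ** 0.5) is ported as Nat.sqrt: exact for 0 ≤ limit ≤ 2^31 (the double result errs by ≪ the gap
-- to the next integer); list indices here are always in range under Pre_ (1 ≤ N), so pyGetD/pySetD are exact.
def sieve_of_eratosthenes (limit : Int) : List Int :=
  let primes0 : List Bool :=
    PySem.List.pySetD (PySem.List.pySetD (List.replicate (limit + 1).toNat true) 0 false) 1 false
  let primes :=
    (PySem.List.pyRange 2 ((Nat.sqrt limit.toNat : Int) + 1) 1).foldl
      (fun fl i =>
        if PySem.List.pyGetD fl i false then
          (PySem.List.pyRange (i * i) (limit + 1) i).foldl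
            (fun fl2 j => PySem.List.pySetD fl2 j false) fl
        else fl) primes0
  ((PySem.List.enumerate primes 0).filter (fun ib => ib.2)).map (fun ib => ib.1)

def generate_blum_numbers (N : Int) : List Int :=
  let primes := sieve_of_eratosthenes N
  let blum := primes.foldl (fun acc p =>
    if p % 4 == 3 then
      primes.foldl (fun acc2 q =>
        if q % 4 == 3 && p != q then
          (if p * q < N then acc2 ++ [p * q] else acc2)
        else acc2) acc
    else acc) ([] : List Int)
  PySem.List.sorted (PySem.Set.ofList blum) (fun x => x) false

-- ===== PORT B =====
-- 'for q in L[i+1:]: if p*q >= N: break; out.append(p*q)' is ported as takeWhile (p*q < N) then map.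
def generate_blum_numbers_alt (N : Int) : List Int :=
  let L := (sieve_of_eratosthenes N).filter (fun p => p % 4 == 3)
  let out := (PySem.List.enumerate L 0).foldl (fun acc ip =>
    acc ++ ((PySem.List.slice L (some (ip.1 + 1)) none).takeWhile
              (fun q => ip.2 * q < N)).map (fun q => ip.2 * q)) ([] : List Int)
  PySem.List.sorted (PySem.Set.ofList out) (fun x => x) false

-- ===== PRECONDITION & SPEC =====
-- Python A raises IndexError for N ≤ 0 (primes[1] on a list of length ≤ 1); B raises there too.
def Pre_generate_blum_numbers (N : Int) : Prop := 1 ≤ N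
instance (N : Int) : Decidable (Pre_generate_blum_numbers N) := by
  unfold Pre_generate_blum_numbers; infer_instance

def pvWitness_generate_blum_numbers : Int := 100

def Spec_generate_blum_numbers (N : Int) (out : List Int) : Prop := out = generate_blum_numbers_alt N
instance (N : Int) (out : List Int) : Decidable (Spec_generate_blum_numbers N out) := by
  unfold Spec_generate_blum_numbers; infer_instance

-- ===== CLAIM (what is proved, stated in full; the proofs are below) =====
def Claim_equal_generate_blum_numbers : Prop :=
  ∀ (N : Int), Dom_generate_blum_numbers N → Pre_generate_blum_numbers N →
    Spec_generate_blum_numbers N (generate_blum_numbers N)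

-- ===== LEMMAS AND PROOFS =====

theorem pvWitness_ok :
    Dom_generate_blum_numbers pvWitness_generate_blum_numbers ∧
    Pre_generate_blum_numbers pvWitness_generate_blum_numbers := by
  constructor <;> decide

-- the sieve output (indices of True flags) is strictly increasing
theorem sieve_pairwise (limit : Int) : (sieve_of_eratosthenes limit).Pairwise (· < ·) :=
  List.pairwise_map.mpr ((PySem.List.pairwise_lt_enumerate _ _).filter _)

-- every sieve element is a nonnegative index
theorem sieve_nonneg (limit : Int) : ∀ p ∈ sieve_of_eratosthenes limit, 0 ≤ p := by
  intro p hp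
  simp only [sieve_of_eratosthenes, List.mem_map, List.mem_filter,
    PySem.List.mem_enumerate_iff] at hp
  obtain ⟨ib, ⟨⟨k, hk, rfl⟩, -⟩, rfl⟩ := hp
  simp

-- on a strictly increasing Int list, takeWhile of a downward-closed predicate is filter
theorem takeWhile_eq_filter_of_sorted (l : List Int) (pred : Int → Bool)
    (hs : l.Pairwise (· < ·)) (hdc : ∀ a b : Int, a ≤ b → pred b = true → pred a = true) :
    l.takeWhile pred = l.filter pred := by
  induction l with
  | nil => rfl
  | cons a t ih =>
    by_cases h : pred a
    · simp [h, ih hs.of_cons]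
    · have ht : ∀ b ∈ t, pred b = false := fun b hb => by
        by_contra hb'
        exact h (hdc a b (le_of_lt (List.rel_of_pairwise_cons hs hb)) (by simpa using hb'))
      simp [h, List.filter_eq_nil_iff.mpr (by intro b hb; simpa using ht b hb)]

-- in a strictly increasing list, everything after position k is larger than L[k]
theorem drop_gt (L : List Int) (hL : L.Pairwise (· < ·)) (k : Nat) (hk : k < L.length) :
    ∀ q ∈ L.drop (k+1), L[k] < q := by
  intro q hq
  rw [← List.take_append_drop (k+1) L] at hL
  apply (List.pairwise_append.mp hL).2.2
  · have hk' : k < (L.take (k+1)).length := by simp; omega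
    have : (L.take (k+1))[k]'hk' = L[k] := List.getElem_take
    exact this ▸ List.getElem_mem hk'
  · exact hq

-- enumerating the unordered pairs {p,q} of a strictly increasing list by (position of the
-- smaller, member of the tail) is the same as enumerating ordered pairs with p ≠ q
theorem pair_bridge (L : List Int) (N x : Int) (hL : L.Pairwise (· < ·)) :
    (∃ k : Nat, ∃ _ : k < L.length, ∃ q ∈ L.drop (k+1), L[k] * q < N ∧ x = L[k] * q) ↔
    (∃ p ∈ L, ∃ q ∈ L, p ≠ q ∧ p * q < N ∧ x = p * q) := by
  constructor
  · rintro ⟨k, hk, q, hq, hlt, rfl⟩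
    exact ⟨L[k], List.getElem_mem hk, q, List.mem_of_mem_drop hq,
      ne_of_lt (drop_gt L hL k hk q hq), hlt, rfl⟩
  · rintro ⟨p, hp, q, hq, hne, hlt, rfl⟩
    obtain ⟨i, hi, rfl⟩ := List.mem_iff_getElem.mp hp
    obtain ⟨j, hj, rfl⟩ := List.mem_iff_getElem.mp hq
    have hij : i ≠ j := fun h => hne (by simp [h])
    rcases Nat.lt_or_ge i j with h | h
    · refine ⟨i, hi, L[j], ?_, hlt, rfl⟩
      refine List.mem_iff_getElem.mpr ⟨j - (i+1), by simp; omega, ?_⟩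
      rw [List.getElem_drop]
      congr 1
      omega
    · have h' : j < i := by omega
      refine ⟨j, hj, L[i], ?_, by linarith [hlt], by ring⟩
      refine List.mem_iff_getElem.mpr ⟨i - (j+1), by simp; omega, ?_⟩
      rw [List.getElem_drop]
      congr 1
      omega

-- membership in A's product list
theorem memA_iff (N x : Int) :
    (x ∈ (sieve_of_eratosthenes N).foldl (fun acc p =>
      if p % 4 == 3 then
        (sieve_of_eratosthenes N).foldl (fun acc2 q =>
          if q % 4 == 3 && p != q then
            (if p * q < N then acc2 ++ [p * q] else acc2)
          else acc2) acc
      else acc) ([] : List Int)) ↔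
    (∃ p ∈ (sieve_of_eratosthenes N).filter (fun p => p % 4 == 3),
      ∃ q ∈ (sieve_of_eratosthenes N).filter (fun p => p % 4 == 3),
        p ≠ q ∧ p * q < N ∧ x = p * q) := by
  have h1 : ∀ (p : Int) (acc : List Int),
      (sieve_of_eratosthenes N).foldl (fun acc2 q =>
          if q % 4 == 3 && p != q then
            (if p * q < N then acc2 ++ [p * q] else acc2)
          else acc2) acc
      = acc ++ ((sieve_of_eratosthenes N).filter
          (fun q => (q % 4 == 3) && (p != q) && (p * q < N))).map (fun q => p * q) := by
    intro p acc
    rw [← PySem.List.foldl_append_if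
      (fun q => (q % 4 == 3) && (p != q) && (p * q < N)) (fun q => p * q)]
    apply PySem.List.foldl_congr_mem
    intro a q _
    by_cases h1 : (q % 4 == 3 && p != q) = true <;> by_cases h2 : (p * q < N) <;> simp [h1, h2]
  have h2 : (sieve_of_eratosthenes N).foldl (fun acc p =>
      if p % 4 == 3 then
        (sieve_of_eratosthenes N).foldl (fun acc2 q =>
          if q % 4 == 3 && p != q then
            (if p * q < N then acc2 ++ [p * q] else acc2)
          else acc2) acc
      else acc) ([] : List Int)
      = (sieve_of_eratosthenes N).foldl (fun acc p =>
        acc ++ (if p % 4 == 3 then ((sieve_of_eratosthenes N).filter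
          (fun q => (q % 4 == 3) && (p != q) && (p * q < N))).map (fun q => p * q) else [])) [] := by
    apply PySem.List.foldl_congr_mem
    intro acc p _
    by_cases h : (p % 4 == 3) = true
    · rw [if_pos h, if_pos h, h1]
    · rw [if_neg h, if_neg h, List.append_nil]
  rw [h2, PySem.List.foldl_append_eq_flatMap]
  simp only [List.nil_append, List.mem_flatMap, List.mem_filter]
  constructor
  · rintro ⟨p, hp, hx⟩
    by_cases h : (p % 4 == 3) = true
    · simp only [h, if_true, List.mem_map, List.mem_filter] at hx
      obtain ⟨q, ⟨hq, hcond⟩, rfl⟩ := hx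
      simp only [Bool.and_eq_true, bne_iff_ne, beq_iff_eq, decide_eq_true_eq] at hcond
      exact ⟨p, ⟨hp, h⟩, q, ⟨hq, by simpa using hcond.1.1⟩, hcond.1.2, hcond.2, rfl⟩
    · simp [h] at hx
  · rintro ⟨p, ⟨hp, h3⟩, q, ⟨hq, hq3⟩, hne, hlt, rfl⟩
    refine ⟨p, hp, ?_⟩
    simp only [h3, if_true, List.mem_map, List.mem_filter]
    exact ⟨q, ⟨hq, by simp [hq3, hne, hlt]⟩, rfl⟩

-- membership in B's product list
theorem memB_iff (N x : Int) :
    (x ∈ (PySem.List.enumerate ((sieve_of_eratosthenes N).filter (fun p => p % 4 == 3)) 0).foldl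
        (fun acc ip =>
          acc ++ ((PySem.List.slice ((sieve_of_eratosthenes N).filter (fun p => p % 4 == 3))
                      (some (ip.1 + 1)) none).takeWhile
                    (fun q => ip.2 * q < N)).map (fun q => ip.2 * q)) ([] : List Int)) ↔
    (∃ p ∈ (sieve_of_eratosthenes N).filter (fun p => p % 4 == 3),
      ∃ q ∈ (sieve_of_eratosthenes N).filter (fun p => p % 4 == 3),
        p ≠ q ∧ p * q < N ∧ x = p * q) := by
  have hL : ((sieve_of_eratosthenes N).filter (fun p => p % 4 == 3)).Pairwise (· < ·) :=
    (sieve_pairwise N).filter _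
  have hpos : ∀ p ∈ (sieve_of_eratosthenes N).filter (fun p => p % 4 == 3), 0 < p := by
    intro p hp
    obtain ⟨hmem, hmod⟩ := List.mem_filter.mp hp
    have := sieve_nonneg N p hmem
    have hmod' : p % 4 = 3 := by simpa using hmod
    omega
  set L := (sieve_of_eratosthenes N).filter (fun p => p % 4 == 3) with hLdef
  rw [PySem.List.foldl_append_eq_flatMap, ← pair_bridge L N x hL]
  simp only [List.nil_append, List.mem_flatMap, PySem.List.mem_enumerate_iff]
  have key : ∀ (k : Nat) (hk : k < L.length),
      ((PySem.List.slice L (some (((0:Int) + ↑k) + 1)) none).takeWhile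
          (fun q => decide (L[k] * q < N))).map (fun q => L[k] * q)
      = ((L.drop (k+1)).filter (fun q => decide (L[k] * q < N))).map (fun q => L[k] * q) := by
    intro k hk
    have hc : ((0:Int) + ↑k) + 1 = ((k+1 : Nat) : Int) := by push_cast; ring
    rw [hc, PySem.List.slice_from_natCast]
    rw [takeWhile_eq_filter_of_sorted _ _ hL.drop ?_]
    intro a b hab hb
    simp only [decide_eq_true_eq] at *
    calc L[k] * a ≤ L[k] * b :=
          mul_le_mul_of_nonneg_left hab (le_of_lt (hpos _ (List.getElem_mem hk)))
      _ < N := hb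
  constructor
  · rintro ⟨ip, ⟨k, hk, rfl⟩, hx⟩
    simp only at hx
    rw [key k hk] at hx
    simp only [List.mem_map, List.mem_filter, decide_eq_true_eq] at hx
    obtain ⟨q, ⟨hq, hlt⟩, rfl⟩ := hx
    exact ⟨k, hk, q, hq, hlt, rfl⟩
  · rintro ⟨k, hk, q, hq, hlt, rfl⟩
    refine ⟨((0:Int) + ↑k, L[k]), ⟨k, hk, rfl⟩, ?_⟩
    simp only
    rw [key k hk]
    simp only [List.mem_map, List.mem_filter, decide_eq_true_eq]
    exact ⟨q, ⟨hq, hlt⟩, rfl⟩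

-- ===== VERDICT (by name: the statement is the Claim_ definition above) =====
theorem generate_blum_numbers_spec : Claim_equal_generate_blum_numbers := by
  intro N _ _
  unfold Spec_generate_blum_numbers generate_blum_numbers generate_blum_numbers_alt
  apply PySem.List.sorted_eq_sorted_of_perm _ _ _ (fun a b h => h)
  refine (List.perm_ext_iff_of_nodup (PySem.Set.nodup_ofList _) (PySem.Set.nodup_ofList _)).mpr ?_
  intro x
  rw [PySem.Set.mem_ofList, PySem.Set.mem_ofList, memA_iff, memB_iff]
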